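-- pv_equiv track=rewrite | github.com/alexballera/introduccion-programacion | practicas/python/practica8/archivos/ejercicio2.py | es_comentario
-- ===== SOURCE A (Python) =====
-- def es_comentario(linea: str) -> bool:
--     res: bool = False
--     es_el_primero = True
--
--     for char in linea:
--         if char == "#" and es_el_primero:
--             res = True
--         elif char != " ":
--             es_el_primero = False
--
--     return res
-- ===== SOURCE B (Python) =====
-- def es_comentario(linea: str) -> bool:
--     return linea.lstrip(" ").startswith("#")
-- ===== Notes on version B (the rewrite author's own statement) =====
-- stated objective: simpler
-- what changed: Replaces the stateful flag-carrying per-character loop with a single expression: strip leading spaces (only the literal space) and test whether the stripped string starts with the comment marker.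
import Mathlib
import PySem

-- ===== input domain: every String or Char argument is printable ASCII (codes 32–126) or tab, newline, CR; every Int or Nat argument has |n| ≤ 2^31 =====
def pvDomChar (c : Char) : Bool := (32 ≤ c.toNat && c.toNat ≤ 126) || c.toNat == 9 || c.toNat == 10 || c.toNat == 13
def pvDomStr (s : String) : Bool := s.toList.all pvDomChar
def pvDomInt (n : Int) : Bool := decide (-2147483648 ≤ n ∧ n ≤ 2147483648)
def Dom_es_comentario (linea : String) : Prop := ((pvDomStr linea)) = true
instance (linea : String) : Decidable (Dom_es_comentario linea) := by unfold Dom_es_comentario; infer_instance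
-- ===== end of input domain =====

-- B replaces A's flag-carrying per-character loop with one expression: drop leading spaces, test for a leading '#'.

-- ===== PORT A =====
-- one step of A's for-loop over the characters, state = (res, es_el_primero)
def esComStep (st : Bool × Bool) (c : Char) : Bool × Bool :=
  if c == '#' && st.2 then (true, st.2)
  else if c != ' ' then (st.1, false)
  else st

def es_comentario (linea : String) : Bool :=
  (linea.toList.foldl esComStep (false, true)).1

-- ===== PORT B =====
-- linea.lstrip(" ") = dropWhile (· == ' '); .startswith("#") = PySem.Chars.startswith
def es_comentario_alt (linea : String) : Bool :=
  PySem.Chars.startswith (linea.toList.dropWhile (· == ' ')) ['#']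

-- ===== PRECONDITION & SPEC =====
def Spec_es_comentario (linea : String) (out : Bool) : Prop := out = es_comentario_alt linea
instance (linea : String) (out : Bool) : Decidable (Spec_es_comentario linea out) := by unfold Spec_es_comentario; infer_instance

-- ===== CLAIM (what is proved, stated in full; the proofs are below) =====
def Claim_equal_es_comentario : Prop := ∀ (linea : String), Dom_es_comentario linea → Spec_es_comentario linea (es_comentario linea)

-- ===== LEMMAS AND PROOFS =====

-- once res is true it stays true
theorem esCom_true (cs : List Char) (p : Bool) :
    (cs.foldl esComStep (true, p)).1 = true := by
  induction cs generalizing p with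
  | nil => rfl
  | cons c cs ih =>
    simp only [List.foldl, esComStep]
    split
    · exact ih _
    · split
      · exact ih false
      · exact ih p

-- once es_el_primero is false, res can never become true
theorem esCom_false (cs : List Char) :
    (cs.foldl esComStep (false, false)).1 = false := by
  induction cs with
  | nil => rfl
  | cons c cs ih =>
    simp only [List.foldl, esComStep]
    split
    · simp_all
    · split <;> exact ih

theorem esCom_main (cs : List Char) :
    (cs.foldl esComStep (false, true)).1
      = PySem.Chars.startswith (cs.dropWhile (· == ' ')) ['#'] := by
  induction cs with
  | nil => rfl
  | cons c cs ih =>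
    by_cases hsp : c = ' '
    · subst hsp
      simpa [List.foldl, esComStep, List.dropWhile] using ih
    · by_cases hh : c = '#'
      · subst hh
        simp [List.foldl, esComStep, List.dropWhile, esCom_true,
          PySem.Chars.startswith]
      · have h1 : (c == ' ') = false := by simp [hsp]
        have h2 : (c == '#') = false := by simp [hh]
        have h3 : ('#' == c) = false := by simp [Ne.symm hh]
        simp [List.foldl, esComStep, h1, h2, h3, hsp, List.dropWhile, esCom_false,
          PySem.Chars.startswith, List.isPrefixOf]

-- ===== VERDICT (by name: the statement is the Claim_ definition above) =====
theorem es_comentario_spec : Claim_equal_es_comentario := by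
  intro linea _
  unfold Spec_es_comentario es_comentario es_comentario_alt
  exact esCom_main linea.toList
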